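-- pv_equiv track=rewrite | github.com/mrperkett/genome-kmers | tests/test_kmers.py | get_expected_group_kmers
-- ===== SOURCE A (Python) =====
-- from typing import Union
--
-- def get_expected_group_kmers(
--
--     sorted_kmers: list[str],
--     min_group_size: int = 1,
--     max_group_size: Union[int, None] = None,
--     yield_first_n: Union[int, None] = None,
-- ) -> tuple[list[int], int]:
--     """
--     Helper function that generates a list of all (kmer_nums, group_size) expected to be yielded
--     by the kmer_nums_by_group_generator() given the list of kmers.  To function as intended,
--     sorted_kmers must be sorted.
--
--     Example:
--     seq: ATATAGACAG
--     kmer_len: 2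
--     unsorted_kmers: ["AT", "TA", "AT", "TA", "AG", "GA", "AC", "CA", "AG"]
--     sorted_kmers: ["AC", "AG", "AG", "AT", "AT", "CA", "GA", "TA", "TA"]
--     expected_kmer_nums_list = [ [0],
--                                 [1, 2],
--                                 [3, 4],
--                                 [5],
--                                 [6],
--                                 [7, 8]
--         ]
--     expected_group_sizes = [1, 2, 2, 1, 1, 2]
--
--     Args:
--         sorted_kmers (list[str]): sorted kmers
--         min_group_size (int, optional): minimum group size to yield. Defaults to 1.
--         max_group_size (Union[int, None], optional): maximum group size to yield. None means
--             that there is no maximum group size. Defaults to None.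
--         yield_first_n (Union[int, None], optional): number to yield before stopping.  None
--             means to yield them all. Defaults to None.
--
--     Returns:
--         tuple[list[list[int]], list[int]]: expected_kmer_nums_list, expected_group_sizes
--     """
--     # verify sorted_kmers is sorted
--     is_sorted = True
--     for i in range(1, len(sorted_kmers)):
--         if sorted_kmers[i] < sorted_kmers[i - 1]:
--             is_sorted = False
--             break
--     if not is_sorted:
--         raise ValueError("sorted_kmers is not sorted")
--
--     # step through the list of kmers adding to expected_kmer_nums_list each time a new group
--     # is encountered
--     num_kmers = len(sorted_kmers)
--     expected_kmer_nums_list = []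
--     group_kmer_nums = []
--     for kmer_num in range(num_kmers):
--         kmer = sorted_kmers[kmer_num]
--         if kmer_num == 0:
--             # if it's the first iteration, set prev_kmer to be the current kmer
--             prev_kmer = kmer
--         else:
--             prev_kmer = sorted_kmers[kmer_num - 1]
--
--         # a new group is encountered whenever kmer does not match prev_kmer
--         if kmer != prev_kmer:
--             expected_kmer_nums_list.append(group_kmer_nums)
--             group_kmer_nums = [kmer_num]
--         else:
--             group_kmer_nums.append(kmer_num)
--
--         # if we reach the end of the list of kmers, add the last group
--         if kmer_num == num_kmers - 1:
--             expected_kmer_nums_list.append(group_kmer_nums)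
--
--     # set expected_group_sizes
--     expected_group_sizes = [len(group) for group in expected_kmer_nums_list]
--
--     # filter by group size requirements
--     for i in range(len(expected_kmer_nums_list) - 1, -1, -1):
--         group_size = expected_group_sizes[i]
--         passes_min_group_size = group_size >= min_group_size
--         passes_max_group_size = max_group_size is None or group_size <= max_group_size
--         if not passes_min_group_size or not passes_max_group_size:
--             del expected_group_sizes[i]
--             del expected_kmer_nums_list[i]
--
--     # filter by yield_first_n requirements
--     if yield_first_n is not None:
--         for i in range(len(expected_kmer_nums_list)):
--             expected_kmer_nums_list[i] = expected_kmer_nums_list[i][:yield_first_n]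
--
--     return expected_kmer_nums_list, expected_group_sizes
-- ===== SOURCE B (Python) =====
-- from itertools import groupby
-- from typing import Union
--
--
-- def get_expected_group_kmers(
--     sorted_kmers: list[str],
--     min_group_size: int = 1,
--     max_group_size: Union[int, None] = None,
--     yield_first_n: Union[int, None] = None,
-- ) -> tuple[list[int], int]:
--     if any(b < a for a, b in zip(sorted_kmers, sorted_kmers[1:])):
--         raise ValueError("sorted_kmers is not sorted")
--
--     nums_list, sizes = [], []
--     offset = 0
--     for _, grp in groupby(sorted_kmers):
--         n = sum(1 for _ in grp)
--         if n >= min_group_size and (max_group_size is None or n <= max_group_size):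
--             group = list(range(offset, offset + n))
--             nums_list.append(group if yield_first_n is None else group[:yield_first_n])
--             sizes.append(n)
--         offset += n
--     return nums_list, sizes
-- ===== Notes on version B (the rewrite author's own statement) =====
-- stated objective: idiomatic
-- what changed: Replaces A's three separate passes (index-based grouping with prev-lookups and end-of-list flushing, a reverse index loop with del for size filtering, and a final truncation loop) by one fused itertools.groupby pass that threads a running offset and filters and truncates each group as it is produced.
import Mathlib
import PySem

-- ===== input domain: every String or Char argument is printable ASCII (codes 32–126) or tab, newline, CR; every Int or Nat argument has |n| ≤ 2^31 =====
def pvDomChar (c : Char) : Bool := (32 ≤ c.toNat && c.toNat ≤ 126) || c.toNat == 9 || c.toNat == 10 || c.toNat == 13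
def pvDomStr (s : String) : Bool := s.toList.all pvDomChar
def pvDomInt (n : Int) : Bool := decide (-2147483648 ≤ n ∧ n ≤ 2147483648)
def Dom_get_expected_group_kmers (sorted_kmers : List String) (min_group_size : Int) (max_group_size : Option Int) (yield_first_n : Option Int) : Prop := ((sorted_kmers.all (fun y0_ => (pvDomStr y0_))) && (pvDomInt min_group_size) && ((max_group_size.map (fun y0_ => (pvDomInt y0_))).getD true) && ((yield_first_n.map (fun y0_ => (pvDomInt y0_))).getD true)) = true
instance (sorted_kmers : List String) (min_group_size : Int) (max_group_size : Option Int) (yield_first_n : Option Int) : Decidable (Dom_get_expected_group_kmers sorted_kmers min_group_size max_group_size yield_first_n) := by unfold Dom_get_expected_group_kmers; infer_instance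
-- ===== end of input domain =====

-- B replaces A's three passes (prev-lookup grouping, reverse del-loop filter, truncation loop)
-- by one fused groupby-style pass over run lengths; objective: idiomatic, same result.

-- ===== PORT A =====
-- A's sorted check ('for i in range(1, len): if l[i] < l[i-1]: break') as the obvious
-- structural recursion over adjacent elements (kmer and its predecessor)
def pvAIsSorted : List String → Bool
  | a :: b :: rest => if b < a then false else pvAIsSorted (b :: rest)
  | _ => true

-- A's main loop over kmer_num: kmer = l[i], prev = l[i-1] (prev = kmer at i = 0) carried
-- along the same walk; state (expected_kmer_nums_list, group_kmer_nums); the trailing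
-- 'if kmer_num == num_kmers - 1' append is the rest.isEmpty branch
def pvALoop : List String → String → Int → List (List Int) → List Int → List (List Int)
  | [], _, _, acc, _ => acc
  | k :: rest, prev, i, acc, group =>
    if k ≠ prev then
      pvALoop rest k (i + 1)
        (if rest.isEmpty then (acc ++ [group]) ++ [[i]] else acc ++ [group]) [i]
    else
      pvALoop rest k (i + 1)
        (if rest.isEmpty then acc ++ [group ++ [i]] else acc) (group ++ [i])

-- one iteration of A's filtering loop at index i: read expected_group_sizes[i],
-- 'del' both entries when the size test fails (i is always in range in this loop)
def pvAFilterStep (min_group_size : Int) (max_group_size : Option Int)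
    (st : List (List Int) × List Int) (i : Nat) : List (List Int) × List Int :=
  let group_size := PySem.List.pyGetD st.2 (i : Int) 0
  let passes_min : Bool := decide (min_group_size ≤ group_size)
  let passes_max : Bool := match max_group_size with
    | none => true
    | some m => decide (group_size ≤ m)
  if !passes_min || !passes_max then (st.1.eraseIdx i, st.2.eraseIdx i) else st

-- A's 'for i in range(len - 1, -1, -1)' as the obvious recursion on the descending counter
def pvAFilter (mn : Int) (mx : Option Int) :
    Nat → List (List Int) × List Int → List (List Int) × List Int
  | 0, st => st
  | i + 1, st => pvAFilter mn mx i (pvAFilterStep mn mx st i)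

def get_expected_group_kmers (sorted_kmers : List String) (min_group_size : Int)
    (max_group_size : Option Int) (yield_first_n : Option Int) : List (List Int) × List Int :=
  if pvAIsSorted sorted_kmers = false then ([], [])  -- raise ValueError: excluded by Pre_
  else
    let expected_kmer_nums_list :=
      match sorted_kmers with
      | [] => []
      | k :: _ => pvALoop sorted_kmers k 0 [] []
    let expected_group_sizes := expected_kmer_nums_list.map (fun g => (g.length : Int))
    let st := pvAFilter min_group_size max_group_size expected_kmer_nums_list.length
      (expected_kmer_nums_list, expected_group_sizes)
    match yield_first_n with
    | none => st
    | some y => (st.1.map (fun g => PySem.List.slice g none (some y)), st.2)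

-- ===== PORT B =====
-- run lengths of consecutive equal elements = the group sizes itertools.groupby yields
def pvRunLens : List String → List Nat
  | [] => []
  | x :: xs => ((xs.takeWhile (· == x)).length + 1) :: pvRunLens (xs.dropWhile (· == x))
termination_by l => l.length
decreasing_by
  have := List.length_dropWhile_le (fun y => y == x) xs
  simp; omega

-- body of B's single groupby loop: filter by size, build range(offset, offset+n),
-- truncate to yield_first_n, advance the offset
def pvBStep (min_group_size : Int) (max_group_size : Option Int) (yield_first_n : Option Int)
    (st : List (List Int) × List Int × Int) (n : Nat) : List (List Int) × List Int × Int :=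
  let (nums, sizes, off) := st
  if decide (min_group_size ≤ (n : Int)) &&
      (match max_group_size with | none => true | some m => decide ((n : Int) ≤ m)) then
    let group := PySem.List.pyRange off (off + (n : Int)) 1
    let group := match yield_first_n with
      | none => group
      | some y => PySem.List.slice group none (some y)
    (nums ++ [group], sizes ++ [(n : Int)], off + (n : Int))
  else (nums, sizes, off + (n : Int))

def get_expected_group_kmers_alt (sorted_kmers : List String) (min_group_size : Int)
    (max_group_size : Option Int) (yield_first_n : Option Int) : List (List Int) × List Int :=
  if (sorted_kmers.zip sorted_kmers.tail).any (fun p => decide (p.2 < p.1)) then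
    ([], [])  -- raise ValueError: excluded by Pre_
  else
    let st := (pvRunLens sorted_kmers).foldl
      (pvBStep min_group_size max_group_size yield_first_n) ([], [], 0)
    (st.1, st.2.1)

-- ===== PRECONDITION & SPEC =====
-- Pre_ holds exactly when sorted_kmers is non-decreasing (no adjacent pair with the later
-- string lexicographically smaller): on any other input the Python A raises
-- ValueError("sorted_kmers is not sorted") and returns nothing.
def Pre_get_expected_group_kmers (sorted_kmers : List String) (min_group_size : Int)
    (max_group_size : Option Int) (yield_first_n : Option Int) : Prop :=
  List.IsChain (fun a b : String => ¬ b.toList < a.toList) sorted_kmers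

instance (sorted_kmers : List String) (min_group_size : Int) (max_group_size : Option Int) (yield_first_n : Option Int) : Decidable (Pre_get_expected_group_kmers sorted_kmers min_group_size max_group_size yield_first_n) := by unfold Pre_get_expected_group_kmers; infer_instance

def pvWitness_get_expected_group_kmers : List String × Int × Option Int × Option Int :=
  (["AC", "AG", "AG", "AT"], 1, some 2, some 1)

def Spec_get_expected_group_kmers (sorted_kmers : List String) (min_group_size : Int) (max_group_size : Option Int) (yield_first_n : Option Int) (out : List (List Int) × List Int) : Prop := out = get_expected_group_kmers_alt sorted_kmers min_group_size max_group_size yield_first_n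
instance (sorted_kmers : List String) (min_group_size : Int) (max_group_size : Option Int) (yield_first_n : Option Int) (out : List (List Int) × List Int) : Decidable (Spec_get_expected_group_kmers sorted_kmers min_group_size max_group_size yield_first_n out) := by unfold Spec_get_expected_group_kmers; infer_instance

-- ===== CLAIM (what is proved, stated in full; the proofs are below) =====
def Claim_equal_get_expected_group_kmers : Prop := ∀ (sorted_kmers : List String) (min_group_size : Int) (max_group_size : Option Int) (yield_first_n : Option Int), Dom_get_expected_group_kmers sorted_kmers min_group_size max_group_size yield_first_n → Pre_get_expected_group_kmers sorted_kmers min_group_size max_group_size yield_first_n → Spec_get_expected_group_kmers sorted_kmers min_group_size max_group_size yield_first_n (get_expected_group_kmers sorted_kmers min_group_size max_group_size yield_first_n)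

-- ===== LEMMAS AND PROOFS =====

-- the size test, shared by both programs once A's sizes list is seen to hold run lengths
def pvOk (mn : Int) (mx : Option Int) (n : Nat) : Bool :=
  decide (mn ≤ (n : Int)) && (match mx with | none => true | some m => decide ((n : Int) ≤ m))

-- the index block [off, off+1, …, off+n-1]
def pvIdxs (off : Int) (n : Nat) : List Int := (List.range n).map (fun (k : Nat) => off + (k : Int))

-- index blocks of the runs, consecutively offset
def pvGroupsOf (off : Int) : List Nat → List (List Int)
  | [] => []
  | n :: ns => pvIdxs off n :: pvGroupsOf (off + n) ns

-- index blocks of the runs that pass the size test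
def pvKept (mn : Int) (mx : Option Int) (off : Int) : List Nat → List (List Int)
  | [] => []
  | n :: ns =>
    if pvOk mn mx n then pvIdxs off n :: pvKept mn mx (off + n) ns
    else pvKept mn mx (off + n) ns

-- the per-group truncation both programs apply
def pvTrunc (y : Option Int) (g : List Int) : List Int :=
  match y with
  | none => g
  | some q => PySem.List.slice g none (some q)

lemma pvIdxs_succ (i : Int) (m : Nat) : pvIdxs i (m + 1) = i :: pvIdxs (i + 1) m := by
  unfold pvIdxs
  rw [List.range_succ_eq_map]
  rw [List.map_cons, List.map_map]
  congr 1
  · simp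
  · apply List.map_congr_left
    intro a _
    simp only [Function.comp_apply]
    push_cast
    ring
lemma pvIdxs_length (i : Int) (m : Nat) : (pvIdxs i m).length = m := by
  simp [pvIdxs]

lemma pvIdxs_pyRange (off : Int) (n : Nat) :
    PySem.List.pyRange off (off + (n : Int)) 1 = pvIdxs off n := by
  rw [PySem.List.pyRange_one]
  have h : (off + (n : Int) - off).toNat = n := by omega
  rw [h]
  unfold pvIdxs
  rfl
lemma pvALoop_cons (k : String) (rest : List String) (prev : String) (i : Int)
    (acc : List (List Int)) (group : List Int) :
    pvALoop (k :: rest) prev i acc group =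
      if k ≠ prev then
        pvALoop rest k (i + 1)
          (if rest.isEmpty then (acc ++ [group]) ++ [[i]] else acc ++ [group]) [i]
      else
        pvALoop rest k (i + 1)
          (if rest.isEmpty then acc ++ [group ++ [i]] else acc) (group ++ [i]) := rfl

lemma pvALoop_acc (l : List String) : ∀ (prev : String) (i : Int) (acc : List (List Int))
    (g : List Int), pvALoop l prev i acc g = acc ++ pvALoop l prev i [] g := by
  induction l with
  | nil => intro prev i acc g; simp [pvALoop]
  | cons k rest ih =>
    intro prev i acc g
    rw [pvALoop_cons, pvALoop_cons]
    split_ifs with h1 h2 h3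
    · rw [ih k (i + 1) (acc ++ [g] ++ [[i]]), ih k (i + 1) ([] ++ [g] ++ [[i]])]; simp
    · rw [ih k (i + 1) (acc ++ [g]), ih k (i + 1) ([] ++ [g])]; simp
    · rw [ih k (i + 1) (acc ++ [g ++ [i]]), ih k (i + 1) ([] ++ [g ++ [i]])]; simp
    · rw [ih k (i + 1) acc]
lemma pvALoop_run (m : Nat) : ∀ (k : String) (rest : List String) (i : Int) (g : List Int),
    rest ≠ [] →
    pvALoop (List.replicate m k ++ rest) k i [] g
      = pvALoop rest k (i + m) [] (g ++ pvIdxs i m) := by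
  induction m with
  | zero =>
    intro k rest i g _
    simp [pvIdxs]
  | succ m ih =>
    intro k rest i g hr
    rw [List.replicate_succ, List.cons_append, pvALoop_cons]
    have hne : (List.replicate m k ++ rest).isEmpty = false := by
      simp [List.isEmpty_eq_false_iff, hr]
    rw [if_neg (by simp), if_neg (by simp [hne])]
    rw [ih k rest (i + 1) (g ++ [i]) hr, pvIdxs_succ]
    congr 1
    · push_cast; ring
    · simp
lemma pvALoop_run_end (m : Nat) : ∀ (k : String) (i : Int) (g : List Int),
    pvALoop (List.replicate (m + 1) k) k i [] g = [g ++ pvIdxs i (m + 1)] := by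
  induction m with
  | zero =>
    intro k i g
    show pvALoop [k] k i [] g = _
    rw [pvALoop_cons]
    simp [pvALoop, pvIdxs]
  | succ m ih =>
    intro k i g
    rw [List.replicate_succ, pvALoop_cons]
    have hne : (List.replicate (m + 1) k).isEmpty = false := by simp
    rw [if_neg (by simp), if_neg (by simp [hne])]
    rw [ih k (i + 1) (g ++ [i])]
    rw [show pvIdxs i (m + 1 + 1) = i :: pvIdxs (i + 1) (m + 1) from pvIdxs_succ i (m + 1)]
    simp
lemma pvALoop_boundary (r k : String) (rest : List String) (i : Int) (g : List Int)
    (h : r ≠ k) : pvALoop (r :: rest) k i [] g = g :: pvALoop (r :: rest) r i [] [] := by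
  rw [pvALoop_cons, pvALoop_cons]
  rw [if_pos h, if_neg (show ¬ (r ≠ r) by simp)]
  cases hre : rest.isEmpty
  · simp only [hre, Bool.false_eq_true, if_false]
    rw [pvALoop_acc rest r (i + 1) ([] ++ [g]), pvALoop_acc rest r (i + 1) []]
    simp
  · simp only [hre, if_true]
    rw [pvALoop_acc rest r (i + 1) ([] ++ [g] ++ [[i]]),
      pvALoop_acc rest r (i + 1) ([] ++ [[] ++ [i]])]
    simp
lemma pv_run_decomp (x : String) (l : List String) :
    x :: l = List.replicate ((l.takeWhile (· == x)).length + 1) x ++ l.dropWhile (· == x) := by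
  have ht : l.takeWhile (· == x) = List.replicate (l.takeWhile (· == x)).length x := by
    apply List.eq_replicate_of_mem
    intro b hb
    have hb2 := List.mem_takeWhile_imp (p := fun y => y == x) hb
    exact eq_of_beq hb2
  calc x :: l = x :: (l.takeWhile (· == x) ++ l.dropWhile (· == x)) := by
        rw [List.takeWhile_append_dropWhile]
    _ = _ := by rw [List.replicate_succ]; simp [← ht]
lemma pv_groups_eq (n : Nat) : ∀ (x : String) (xs : List String), xs.length ≤ n → ∀ (i : Int),
    pvALoop (x :: xs) x i [] [] = pvGroupsOf i (pvRunLens (x :: xs)) := by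
  induction n with
  | zero =>
    intro x xs hx i
    have hxe : xs = [] := List.length_eq_zero_iff.mp (Nat.le_zero.mp hx)
    subst hxe
    rw [pvALoop_cons]
    simp [pvALoop, pvRunLens, pvGroupsOf, pvIdxs]
  | succ n ih =>
    intro x xs hx i
    have hdec := pv_run_decomp x xs
    rw [pvRunLens]
    cases hd : xs.dropWhile (· == x) with
    | nil =>
      rw [hd] at hdec
      rw [List.append_nil] at hdec
      rw [hdec, pvALoop_run_end]
      simp [pvGroupsOf, hd, pvRunLens]
    | cons r d =>
      have hrk : r ≠ x := by
        have h2 := List.head?_dropWhile_not (fun y => y == x) xs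
        rw [hd] at h2
        simp at h2
        simpa using h2
      have hdlen : d.length ≤ n := by
        have h1 : (xs.dropWhile (· == x)).length ≤ xs.length :=
          List.length_dropWhile_le _ xs
        rw [hd] at h1
        simp at h1
        omega
      rw [hd] at hdec
      rw [hdec]
      rw [pvALoop_run ((xs.takeWhile (· == x)).length + 1) x (r :: d) i [] (by simp)]
      rw [pvALoop_boundary r x d _ _ hrk]
      rw [ih r d hdlen]
      simp [pvGroupsOf]
lemma pv_sizes_eq (rs : List Nat) : ∀ (off : Int),
    (pvGroupsOf off rs).map (fun g => (g.length : Int)) = rs.map (fun (k : Nat) => (k : Int)) := by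
  induction rs with
  | nil => intro off; simp [pvGroupsOf]
  | cons n ns ih => intro off; simp [pvGroupsOf, pvIdxs_length, ih]

lemma pv_groupsOf_length (rs : List Nat) : ∀ (off : Int),
    (pvGroupsOf off rs).length = rs.length := by
  induction rs with
  | nil => intro off; simp [pvGroupsOf]
  | cons n ns ih => intro off; simp [pvGroupsOf, ih]

lemma pv_groupsOf_append (rs ns : List Nat) : ∀ (off : Int),
    pvGroupsOf off (rs ++ ns) = pvGroupsOf off rs ++ pvGroupsOf (off + (rs.sum : Int)) ns := by
  induction rs with
  | nil => intro off; simp [pvGroupsOf]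
  | cons n rest ih =>
    intro off
    simp only [List.cons_append, pvGroupsOf, ih]
    congr 2
    push_cast [List.sum_cons]
    ring

lemma pv_kept_append (mn : Int) (mx : Option Int) (rs : List Nat) (n : Nat) : ∀ (off : Int),
    pvKept mn mx off (rs ++ [n]) =
      pvKept mn mx off rs ++
        (if pvOk mn mx n then [pvIdxs (off + (rs.sum : Int)) n] else []) := by
  induction rs with
  | nil =>
    intro off
    cases h : pvOk mn mx n <;> simp [pvKept, h]
  | cons r rest ih =>
    intro off
    simp only [List.cons_append, pvKept, ih]
    have hc : off + (r : Int) + ((rest.sum : Nat) : Int) = off + (((r :: rest).sum : Nat) : Int) := by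
      push_cast [List.sum_cons]
      ring
    rw [hc]
    split <;> simp

lemma pv_getD_mid (pre : List Int) (x : Int) (post : List Int) (d : Int) :
    (pre ++ x :: post).getD pre.length d = x := by
  induction pre with
  | nil => simp
  | cons a t ih => simpa using ih

lemma pv_eraseIdx_mid {α : Type} (pre : List α) (x : α) (post : List α) :
    (pre ++ x :: post).eraseIdx pre.length = pre ++ post := by
  induction pre with
  | nil => simp
  | cons a t ih => simpa using ih

lemma pvAFilterStep_char (mn : Int) (mx : Option Int) (st : List (List Int) × List Int)
    (i : Nat) (n : Nat) (h : PySem.List.pyGetD st.2 (i : Int) 0 = (n : Int)) :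
    pvAFilterStep mn mx st i =
      if pvOk mn mx n then st else (st.1.eraseIdx i, st.2.eraseIdx i) := by
  unfold pvAFilterStep pvOk
  rw [h]
  cases mx with
  | none => by_cases h1 : mn ≤ (n : Int) <;> simp [h1]
  | some m =>
    by_cases h1 : mn ≤ (n : Int) <;> by_cases h2 : (n : Int) ≤ m <;> simp [h1, h2]

lemma pv_filter_eq (mn : Int) (mx : Option Int) (rs : List Nat) :
    ∀ (off : Int) (ts : List (List Int)) (us : List Int),
    pvAFilter mn mx rs.length
        (pvGroupsOf off rs ++ ts, rs.map (fun (k : Nat) => (k : Int)) ++ us) =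
      (pvKept mn mx off rs ++ ts,
       (rs.filter (pvOk mn mx)).map (fun (k : Nat) => (k : Int)) ++ us) := by
  induction rs using List.reverseRecOn with
  | nil => intro off ts us; simp [pvAFilter, pvKept, pvGroupsOf]
  | append_singleton rest n ih =>
    intro off ts us
    have hlen : (rest ++ [n]).length = rest.length + 1 := by simp
    rw [hlen, pvAFilter]
    have hrw : pvGroupsOf off (rest ++ [n]) ++ ts =
        pvGroupsOf off rest ++ (pvIdxs (off + (rest.sum : Int)) n :: ts) := by
      rw [pv_groupsOf_append]
      simp [pvGroupsOf]
    have hrw2 : (rest ++ [n]).map (fun (k : Nat) => (k : Int)) ++ us =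
        rest.map (fun (k : Nat) => (k : Int)) ++ ((n : Int) :: us) := by simp
    rw [hrw, hrw2]
    have hg : PySem.List.pyGetD (rest.map (fun (k : Nat) => (k : Int)) ++ ((n : Int) :: us))
        ((rest.length : Nat) : Int) 0 = (n : Int) := by
      rw [PySem.List.pyGetD_natCast]
      have hlm : rest.length = (rest.map (fun (k : Nat) => (k : Int))).length := by simp
      rw [hlm, pv_getD_mid]
    rw [pvAFilterStep_char mn mx
      (pvGroupsOf off rest ++ (pvIdxs (off + (rest.sum : Int)) n :: ts),
       rest.map (fun (k : Nat) => (k : Int)) ++ ((n : Int) :: us)) rest.length n hg]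
    by_cases hok : pvOk mn mx n = true
    · rw [if_pos hok,
        ih off (pvIdxs (off + (rest.sum : Int)) n :: ts) ((n : Int) :: us),
        pv_kept_append, if_pos hok]
      simp [List.filter_append, hok]
    · have hok' : pvOk mn mx n = false := by simpa using hok
      rw [if_neg hok]
      dsimp only
      have e1 : (pvGroupsOf off rest ++ (pvIdxs (off + (rest.sum : Int)) n :: ts)).eraseIdx
          rest.length = pvGroupsOf off rest ++ ts := by
        have h1 : rest.length = (pvGroupsOf off rest).length := (pv_groupsOf_length rest off).symm
        rw [h1, pv_eraseIdx_mid]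
      have e2 : (rest.map (fun (k : Nat) => (k : Int)) ++ ((n : Int) :: us)).eraseIdx
          rest.length = rest.map (fun (k : Nat) => (k : Int)) ++ us := by
        have h1 : rest.length = (rest.map (fun (k : Nat) => (k : Int))).length := by simp
        rw [h1, pv_eraseIdx_mid]
      rw [e1, e2, ih off ts us, pv_kept_append, if_neg hok]
      simp [List.filter_append, hok']

lemma pvBStep_eq (mn : Int) (mx : Option Int) (y : Option Int) (nums : List (List Int))
    (sizes : List Int) (off : Int) (n : Nat) :
    pvBStep mn mx y (nums, sizes, off) n =
      if pvOk mn mx n then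
        (nums ++ [pvTrunc y (pvIdxs off n)], sizes ++ [(n : Int)], off + (n : Int))
      else (nums, sizes, off + (n : Int)) := by
  rw [← pvIdxs_pyRange off n]
  cases y <;> cases mx <;> simp only [pvBStep, pvOk, pvTrunc] <;> split <;> rfl

lemma pv_b_loop (mn : Int) (mx : Option Int) (y : Option Int) (rs : List Nat) :
    ∀ (nums : List (List Int)) (sizes : List Int) (off : Int),
    rs.foldl (pvBStep mn mx y) (nums, sizes, off) =
      (nums ++ (pvKept mn mx off rs).map (pvTrunc y),
       sizes ++ (rs.filter (pvOk mn mx)).map (fun (k : Nat) => (k : Int)),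
       off + (rs.sum : Int)) := by
  induction rs with
  | nil => intro nums sizes off; simp [pvKept]
  | cons n ns ih =>
    intro nums sizes off
    rw [List.foldl_cons, pvBStep_eq]
    by_cases hok : pvOk mn mx n = true
    · rw [if_pos hok, ih]
      simp only [pvKept, if_pos hok, List.filter_cons, hok, List.map_cons, List.sum_cons,
        Prod.mk.injEq, List.append_assoc, List.cons_append, List.nil_append]
      refine ⟨by trivial, by trivial, ?_⟩
      push_cast
      ring
    · have hok' : pvOk mn mx n = false := by simpa using hok
      rw [if_neg hok, ih]
      simp only [pvKept, hok', Bool.false_eq_true, if_false, List.filter_cons, List.sum_cons,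
        Prod.mk.injEq]
      refine ⟨by trivial, by trivial, ?_⟩
      push_cast
      ring

lemma pv_a_sorted_of_chain (l : List String)
    (h : List.IsChain (fun a b : String => ¬ b.toList < a.toList) l) :
    pvAIsSorted l = true := by
  induction l with
  | nil => rfl
  | cons a t ih =>
    cases t with
    | nil => rfl
    | cons b r =>
      rw [List.isChain_cons_cons] at h
      rw [pvAIsSorted, if_neg (fun hlt => h.1 (String.lt_iff_toList_lt.mp hlt))]
      exact ih h.2

lemma pv_b_sorted_of_chain (l : List String)
    (h : List.IsChain (fun a b : String => ¬ b.toList < a.toList) l) :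
    (l.zip l.tail).any (fun p => decide (p.2 < p.1)) = false := by
  induction l with
  | nil => rfl
  | cons a t ih =>
    cases t with
    | nil => rfl
    | cons b r =>
      rw [List.isChain_cons_cons] at h
      have hb := ih h.2
      simp only [List.tail_cons, List.zip_cons_cons, List.any_cons] at *
      rw [hb]
      simp only [Bool.or_false]
      exact decide_eq_false (fun hlt => h.1 (String.lt_iff_toList_lt.mp hlt))

-- ===== VERDICT (by name: the statement is the Claim_ definition above) =====
theorem get_expected_group_kmers_spec : Claim_equal_get_expected_group_kmers := by
  unfold Claim_equal_get_expected_group_kmers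
  intro l mn mx y _ hpre
  unfold Spec_get_expected_group_kmers
  unfold Pre_get_expected_group_kmers at hpre
  unfold get_expected_group_kmers get_expected_group_kmers_alt
  rw [pv_a_sorted_of_chain l hpre, pv_b_sorted_of_chain l hpre]
  simp only [Bool.true_eq_false, Bool.false_eq_true, if_false]
  cases l with
  | nil =>
    cases y <;> simp [pvRunLens, pvAFilter]
  | cons x xs =>
    dsimp only
    rw [pv_groups_eq xs.length x xs le_rfl 0]
    rw [pv_sizes_eq, pv_groupsOf_length]
    have hf := pv_filter_eq mn mx (pvRunLens (x :: xs)) 0 [] []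
    simp only [List.append_nil] at hf
    rw [hf]
    rw [pv_b_loop mn mx y (pvRunLens (x :: xs)) [] [] 0]
    dsimp only
    simp only [List.nil_append]
    cases y with
    | none => rw [show pvTrunc none = id from funext fun g => rfl, List.map_id]
    | some q => rfl
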